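-- pv_equiv track=rewrite | github.com/WildStriker/advent_of_code_2019 | advent_of_code/day_16/signal.py | phase_shift
-- ===== SOURCE A (Python) =====
-- from typing import List, TextIO
--
-- def phase_shift(signal: List[int]) -> List[int]:
--     """run signal through phase calculations
--
--     Arguments:
--         signal {List[int]} -- original signal
--
--     Returns:
--         List[int] -- output results
--     """
--     pattern = [0, 1, 0, -1]
--     phases = 100
--     signal_length = len(signal)
--     pattern_length = len(pattern)
--     input_list = signal.copy()
--     output_list = [None] * len(input_list)
--     for _ in range(phases):
--         for index in range(signal_length):
--             total = 0
--             input_index = 0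
--
--             index_pattern = 0
--             repeat = index
--             # skip all repeated 0s
--             if pattern[index_pattern] == 0:
--                 input_index += repeat
--             elif repeat:
--                 # tally results
--                 total += sum(input_list[input_index:input_index +
--                                         repeat]) * pattern[index_pattern]
--                 input_index += repeat
--
--             repeat += 1
--             index_pattern += 1
--             while input_index < signal_length:
--                 # skip all repeated 0s
--                 if pattern[index_pattern] == 0:
--                     input_index += repeat
--                 else:
--                     total += sum(input_list[input_index:input_index +
--                                             repeat]) * pattern[index_pattern]
--                     input_index += repeat
--
--                 index_pattern += 1
--                 if index_pattern >= pattern_length: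
--                     index_pattern = 0
--             output_list[index] = abs(total) % 10
--         input_list = output_list.copy()
--
--     return output_list
-- ===== SOURCE B (Python) =====
-- from typing import List
--
-- def phase_shift(sig: List[int]) -> List[int]:
--     """FFT phase transform, 100 phases, via prefix sums: each output digit is an
--     alternating sum of contiguous block sums read off a prefix-sum table."""
--     n = len(sig)
--     cur = sig
--     for _ in range(100):
--         prefix = [0]
--         for x in cur:
--             prefix.append(prefix[-1] + x)
--         out = []
--         for i in range(n):
--             step = i + 1
--             total = 0
--             sign = 1
--             start = i
--             while start < n:
--                 end = min(start + step, n)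
--                 total += sign * (prefix[end] - prefix[start])
--                 sign = -sign
--                 start += 2 * step
--             out.append(abs(total) % 10)
--         cur = out
--     return cur
-- ===== Notes on version B (the rewrite author's own statement) =====
-- stated objective: faster
-- what changed: B builds a prefix-sum table once per phase and computes each pattern-block sum as a single subtraction with alternating signs (skipping the zero blocks by stepping 2*block), instead of A's per-block rescan of the input via slice sums while cycling the 4-entry pattern.
import Mathlib
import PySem

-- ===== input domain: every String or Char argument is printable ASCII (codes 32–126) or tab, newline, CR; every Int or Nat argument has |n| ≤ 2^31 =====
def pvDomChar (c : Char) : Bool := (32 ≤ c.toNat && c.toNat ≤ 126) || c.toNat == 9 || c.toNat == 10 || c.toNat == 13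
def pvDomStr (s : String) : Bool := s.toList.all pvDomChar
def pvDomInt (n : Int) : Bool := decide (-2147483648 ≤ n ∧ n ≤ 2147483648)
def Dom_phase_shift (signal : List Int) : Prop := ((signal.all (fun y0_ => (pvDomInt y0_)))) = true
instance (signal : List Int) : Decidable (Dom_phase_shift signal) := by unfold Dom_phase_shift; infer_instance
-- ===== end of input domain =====

-- B replaces A's per-digit rescan of the input (sum over each pattern block) by a prefix-sum
-- table, so each block sum is one subtraction: O(phases·n·log n) instead of O(phases·n²).

-- ===== PORT A =====
-- pattern = [0, 1, 0, -1]
def pvPattern : List Int := [0, 1, 0, -1]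

-- the `while input_index < signal_length` loop of A; state = (input_index, index_pattern, total).
-- fuel bounds the iteration count (each iteration adds rep ≥ 1 to input_index, so n iterations suffice).
def pvALoop (input_list : List Int) (n rep : Nat) : Nat → Nat → Nat → Int → Int
  | 0, _, _, total => total
  | fuel + 1, ii, ip, total =>
    if ii < n then
      -- index_pattern is always kept in 0..3 by the wrap-around below, so `getD` is pattern[ip]
      let p := pvPattern.getD ip 0
      let st : Int × Nat :=
        if p = 0 then (total, ii + rep)
        else (total + (PySem.List.slice input_list (some (ii : Int)) (some ((ii : Int) + (rep : Int)))).sum * p,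
              ii + rep)
      let ip' := if ip + 1 ≥ 4 then 0 else ip + 1
      pvALoop input_list n rep fuel st.2 ip' st.1
    else total

-- body of `for index in range(signal_length)`: the prologue before the while loop, then the loop
def pvAIndex (input_list : List Int) (n index : Nat) : Int :=
  let total : Int := 0
  let input_index : Nat := 0
  let index_pattern : Nat := 0
  let st : Int × Nat :=
    if pvPattern.getD index_pattern 0 = 0 then (total, input_index + index)
    else if index ≠ 0 then
      (total + (PySem.List.slice input_list (some (input_index : Int)) (some ((input_index : Int) + (index : Int)))).sum * pvPattern.getD index_pattern 0,
       input_index + index)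
    else (total, input_index)
  pvALoop input_list n (index + 1) n st.2 (index_pattern + 1) st.1

-- one phase: output_list[index] = abs(total) % 10
def pvAPhase (input_list : List Int) (n : Nat) : List Int :=
  (List.range n).map (fun index => PySem.Int.mod |pvAIndex input_list n index| 10)

def phase_shift (signal : List Int) : List Int :=
  let n := signal.length
  (List.range 100).foldl (fun input_list _ => pvAPhase input_list n) signal

-- ===== PORT B =====
-- prefix = [0]; for x in cur: prefix.append(prefix[-1] + x)
def pvBPrefix (cur : List Int) : List Int :=
  cur.foldl (fun pre x => pre ++ [PySem.List.pyGetD pre (-1) 0 + x]) [0]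

-- B's `while start < n` loop: one subtraction per nonzero pattern block, sign alternates,
-- zero blocks are skipped by stepping 2*step. Indices into prefix are always in range.
def pvBLoop (pre : List Int) (n step : Nat) : Nat → Nat → Int → Int → Int
  | 0, _, _, total => total
  | fuel + 1, start, sign, total =>
    if start < n then
      let e := min (start + step) n
      pvBLoop pre n step fuel (start + 2 * step) (-sign)
        (total + sign * (pre.getD e 0 - pre.getD start 0))
    else total

def pvBPhase (cur : List Int) (n : Nat) : List Int :=
  let pre := pvBPrefix cur
  (List.range n).map (fun i => PySem.Int.mod |pvBLoop pre n (i + 1) n i 1 0| 10)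

def phase_shift_alt (signal : List Int) : List Int :=
  let n := signal.length
  (List.range 100).foldl (fun cur _ => pvBPhase cur n) signal

-- ===== PRECONDITION & SPEC =====
def Spec_phase_shift (signal : List Int) (out : List Int) : Prop := out = phase_shift_alt signal
instance (signal : List Int) (out : List Int) : Decidable (Spec_phase_shift signal out) := by unfold Spec_phase_shift; infer_instance

-- ===== CLAIM (what is proved, stated in full; the proofs are below) =====
def Claim_equal_phase_shift : Prop := ∀ (signal : List Int), Dom_phase_shift signal → Spec_phase_shift signal (phase_shift signal)

-- ===== LEMMAS AND PROOFS =====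

lemma pvALoop_ge (cur : List Int) (n rep fa ii ip : Nat) (total : Int) (h : ¬ ii < n) :
    pvALoop cur n rep fa ii ip total = total := by
  cases fa <;> simp [pvALoop, h]

lemma pvBLoop_ge (pre : List Int) (n step fb start : Nat) (sign total : Int) (h : ¬ start < n) :
    pvBLoop pre n step fb start sign total = total := by
  cases fb <;> simp [pvBLoop, h]

-- difference of prefix sums = block sum (clamped take)
lemma pvBlk (l : List Int) (a rep : Nat) :
    (l.take (min (a + rep) l.length)).sum - (l.take a).sum = ((l.drop a).take rep).sum := by
  rcases le_or_gt a l.length with ha | ha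
  · have hb : min (a + rep) l.length = a + (min (a + rep) l.length - a) := by omega
    rw [hb, List.take_add, List.sum_append]
    have h2 : (l.drop a).take (min (a + rep) l.length - a) = (l.drop a).take rep := by
      rcases le_or_gt (a + rep) l.length with h | h
      · congr 1; omega
      · have hlen : (l.drop a).length = l.length - a := List.length_drop ..
        rw [show min (a + rep) l.length - a = l.length - a from by omega]
        rw [← hlen, List.take_length, List.take_of_length_le (by omega)]
    rw [h2]; ring
  · rw [List.take_of_length_le (by omega), List.take_of_length_le (by omega),
        List.drop_of_length_le (by omega)]
    simp

-- running sums
def pvPS (s : Int) : List Int → List Int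
  | [] => []
  | x :: l => (s + x) :: pvPS (s + x) l

lemma pvBPrefix_foldl (l : List Int) : ∀ (acc : List Int) (s : Int),
    PySem.List.pyGetD acc (-1) 0 = s →
    l.foldl (fun pre x => pre ++ [PySem.List.pyGetD pre (-1) 0 + x]) acc = acc ++ pvPS s l := by
  induction l with
  | nil => intro acc s _; simp [pvPS]
  | cons x l ih =>
    intro acc s hs
    simp only [List.foldl_cons, hs]
    rw [ih (acc ++ [s + x]) (s + x) (PySem.List.pyGetD_neg_one_append_singleton ..)]
    simp [pvPS]

lemma pvPS_getD (l : List Int) : ∀ (s : Int) (k : Nat), k ≤ l.length →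
    (s :: pvPS s l).getD k 0 = s + (l.take k).sum := by
  induction l with
  | nil =>
    intro s k hk
    have hk0 : k = 0 := by simpa using hk
    subst hk0; simp [pvPS]
  | cons x l ih =>
    intro s k hk
    cases k with
    | zero => simp
    | succ k =>
      have := ih (s + x) k (by simpa using hk)
      simp only [pvPS, List.getD_cons_succ] at *
      rw [this, List.take_succ_cons, List.sum_cons]; ring

lemma pvBPrefix_getD (cur : List Int) (k : Nat) (hk : k ≤ cur.length) :
    (pvBPrefix cur).getD k 0 = (cur.take k).sum := by
  unfold pvBPrefix
  rw [pvBPrefix_foldl cur [0] 0 (by decide)]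
  have := pvPS_getD cur 0 k hk
  simpa using this

lemma stepA1 (cur : List Int) (n rep f ii : Nat) (total : Int) (h : ii < n) :
    pvALoop cur n rep (f + 1) ii 1 total
      = pvALoop cur n rep f (ii + rep) 2 (total + (PySem.List.slice cur (some (ii : Int)) (some ((ii : Int) + (rep : Int)))).sum) := by
  simp only [pvALoop, if_pos h]; norm_num [pvPattern]

lemma stepA2 (cur : List Int) (n rep f ii : Nat) (total : Int) (h : ii < n) :
    pvALoop cur n rep (f + 1) ii 2 total = pvALoop cur n rep f (ii + rep) 3 total := by
  simp only [pvALoop, if_pos h]; norm_num [pvPattern]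

lemma stepA3 (cur : List Int) (n rep f ii : Nat) (total : Int) (h : ii < n) :
    pvALoop cur n rep (f + 1) ii 3 total
      = pvALoop cur n rep f (ii + rep) 0 (total - (PySem.List.slice cur (some (ii : Int)) (some ((ii : Int) + (rep : Int)))).sum) := by
  simp only [pvALoop, if_pos h]; norm_num [pvPattern, sub_eq_add_neg]

lemma stepA0 (cur : List Int) (n rep f ii : Nat) (total : Int) (h : ii < n) :
    pvALoop cur n rep (f + 1) ii 0 total = pvALoop cur n rep f (ii + rep) 1 total := by
  simp only [pvALoop, if_pos h]; norm_num [pvPattern]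

lemma stepB (pre : List Int) (n step f start : Nat) (sign total : Int) (h : start < n) :
    pvBLoop pre n step (f + 1) start sign total
      = pvBLoop pre n step f (start + 2 * step) (-sign)
          (total + sign * (pre.getD (min (start + step) n) 0 - pre.getD start 0)) := by
  simp only [pvBLoop, if_pos h]

-- core correspondence: A's pattern-cycling while loop (entered at index_pattern = 1 for sign 1,
-- at 3 for sign -1) computes the same total as B's prefix-difference loop.
lemma pvCore (cur pre : List Int) (rep : Nat) (hrep : 1 ≤ rep)
    (hpre : ∀ k, k ≤ cur.length → pre.getD k 0 = (cur.take k).sum) :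
    ∀ (d ii : Nat) (s total : Int) (fa fb : Nat), (s = 1 ∨ s = -1) →
      cur.length - ii ≤ d → cur.length - ii ≤ fa → cur.length - ii ≤ fb →
      pvALoop cur cur.length rep fa ii (if s = 1 then 1 else 3) total
        = pvBLoop pre cur.length rep fb ii s total := by
  intro d
  induction d with
  | zero =>
    intro ii s total fa fb hs hd hfa hfb
    have h : ¬ ii < cur.length := by omega
    rw [pvALoop_ge _ _ _ _ _ _ _ h, pvBLoop_ge _ _ _ _ _ _ _ h]
  | succ d ih =>
    intro ii s total fa fb hs hd hfa hfb
    by_cases hlt : ii < cur.length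
    · obtain ⟨fa', rfl⟩ : ∃ fa', fa = fa' + 1 := ⟨fa - 1, by omega⟩
      obtain ⟨fb', rfl⟩ : ∃ fb', fb = fb' + 1 := ⟨fb - 1, by omega⟩
      have hblk : pre.getD (min (ii + rep) cur.length) 0 - pre.getD ii 0
          = ((cur.drop ii).take rep).sum := by
        rw [hpre _ (by omega), hpre _ (by omega)]
        exact pvBlk cur ii rep
      have hslice : (PySem.List.slice cur (some (ii : Int)) (some ((ii : Int) + (rep : Int)))).sum
          = ((cur.drop ii).take rep).sum := by
        rw [PySem.List.slice_natCast_add]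
      rw [stepB pre _ rep fb' ii s total hlt, hblk]
      rcases hs with rfl | rfl
      · -- sign 1 : A enters the while body at index_pattern = 1
        rw [show (if (1 : Int) = 1 then 1 else 3) = 1 from rfl,
            stepA1 cur _ rep fa' ii total hlt, hslice]
        by_cases h2 : ii + rep < cur.length
        · obtain ⟨fa'', rfl⟩ : ∃ fa'', fa' = fa'' + 1 := ⟨fa' - 1, by omega⟩
          rw [stepA2 cur _ rep fa'' (ii + rep) _ h2,
              show ii + rep + rep = ii + 2 * rep from by ring]
          have := ih (ii + 2 * rep) (-1) (total + 1 * ((cur.drop ii).take rep).sum)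
            fa'' fb' (Or.inr rfl) (by omega) (by omega) (by omega)
          rw [show (if (-1 : Int) = 1 then 1 else 3) = 3 from by norm_num] at this
          rw [show total + ((cur.drop ii).take rep).sum = total + 1 * ((cur.drop ii).take rep).sum from by ring]
          exact this
        · rw [pvALoop_ge _ _ _ _ _ _ _ h2, pvBLoop_ge _ _ _ _ _ _ _ (by omega)]
          ring
      · -- sign -1 : A enters the while body at index_pattern = 3
        rw [show (if (-1 : Int) = 1 then 1 else 3) = 3 from by norm_num,
            stepA3 cur _ rep fa' ii total hlt, hslice]
        by_cases h2 : ii + rep < cur.length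
        · obtain ⟨fa'', rfl⟩ : ∃ fa'', fa' = fa'' + 1 := ⟨fa' - 1, by omega⟩
          rw [stepA0 cur _ rep fa'' (ii + rep) _ h2,
              show ii + rep + rep = ii + 2 * rep from by ring]
          have := ih (ii + 2 * rep) 1 (total + -1 * ((cur.drop ii).take rep).sum)
            fa'' fb' (Or.inl rfl) (by omega) (by omega) (by omega)
          rw [show (if (1 : Int) = 1 then 1 else 3) = 1 from rfl] at this
          rw [show total - ((cur.drop ii).take rep).sum = total + -1 * ((cur.drop ii).take rep).sum from by ring,
              show (-(-1 : Int)) = 1 from by norm_num]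
          exact this
        · rw [pvALoop_ge _ _ _ _ _ _ _ h2, pvBLoop_ge _ _ _ _ _ _ _ (by omega)]
          ring
    · rw [pvALoop_ge _ _ _ _ _ _ _ hlt, pvBLoop_ge _ _ _ _ _ _ _ hlt]

lemma pvIndex_eq (cur : List Int) (i : Nat) :
    pvAIndex cur cur.length i = pvBLoop (pvBPrefix cur) cur.length (i + 1) cur.length i 1 0 := by
  have h := pvCore cur (pvBPrefix cur) (i + 1) (by omega) (fun k hk => pvBPrefix_getD cur k hk)
    cur.length i 1 0 cur.length cur.length (Or.inl rfl) (by omega) (by omega) (by omega)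
  rw [show (if (1 : Int) = 1 then 1 else 3) = 1 from rfl] at h
  simp only [pvAIndex]
  norm_num [pvPattern]
  exact h

lemma pvPhase_eq (cur : List Int) : pvAPhase cur cur.length = pvBPhase cur cur.length := by
  unfold pvAPhase pvBPhase
  refine List.map_congr_left (fun i _ => ?_)
  rw [pvIndex_eq]

lemma pvFold_eq (n : Nat) (ms : List Nat) : ∀ (l : List Int), l.length = n →
    ms.foldl (fun acc _ => pvAPhase acc n) l = ms.foldl (fun acc _ => pvBPhase acc n) l := by
  induction ms with
  | nil => intro l _; rfl
  | cons m ms ih =>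
    intro l hl
    simp only [List.foldl_cons]
    rw [show pvAPhase l n = pvBPhase l n from hl ▸ pvPhase_eq l]
    exact ih _ (by simp [pvBPhase])

-- ===== VERDICT (by name: the statement is the Claim_ definition above) =====
theorem phase_shift_spec : Claim_equal_phase_shift := by
  intro signal _
  unfold Spec_phase_shift phase_shift phase_shift_alt
  exact pvFold_eq signal.length (List.range 100) signal rfl
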